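-- pv_equiv track=rewrite | github.com/1740928596/python- | 40.py | find_unlearned_words
-- ===== SOURCE A (Python) =====
-- def find_unlearned_words(learned_words, article):
--     learned_set = set(learned_words)
--     article_words = article.split()
--     unlearned_words = []
--     seen_words = set()
--
--     for word in article_words:
--         if word == '#':
--             break
--         if word not in learned_set and word not in seen_words:
--             unlearned_words.append(word)
--             seen_words.add(word)
--
--     return unlearned_words
-- ===== SOURCE B (Python) =====
-- def find_unlearned_words(learned_words, article):
--     words = article.split()
--     return [w for i, w in enumerate(words)
--             if '#' not in words[:i+1]
--             and w not in learned_words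
--             and w not in words[:i]]
-- ===== Notes on version B (the rewrite author's own statement) =====
-- stated objective: alternative
-- what changed: Replaces the break-loop with mutable seen/learned sets by a single index-based comprehension that keeps words[i] iff no '#' occurs in words[:i+1], the word is not learned, and it does not occur in words[:i] (positional first-occurrence test via prefix slices instead of a seen-set and break).
import Mathlib
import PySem

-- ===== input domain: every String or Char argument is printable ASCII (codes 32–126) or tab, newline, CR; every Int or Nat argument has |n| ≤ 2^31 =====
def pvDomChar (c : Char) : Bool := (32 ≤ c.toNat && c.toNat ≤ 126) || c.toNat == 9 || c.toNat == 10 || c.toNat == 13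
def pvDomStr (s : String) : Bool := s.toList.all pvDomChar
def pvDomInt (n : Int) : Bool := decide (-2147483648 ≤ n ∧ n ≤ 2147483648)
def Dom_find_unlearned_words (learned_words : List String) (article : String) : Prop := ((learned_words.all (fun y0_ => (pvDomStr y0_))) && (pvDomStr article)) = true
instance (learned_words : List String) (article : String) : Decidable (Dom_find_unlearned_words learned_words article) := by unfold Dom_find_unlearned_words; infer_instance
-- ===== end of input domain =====

-- B replaces A's break-loop with mutable seen/learned sets by one index-based comprehension:
-- words[i] is kept iff '#' does not occur in words[:i+1], it is not learned, and it does not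
-- occur in words[:i] (positional first-occurrence test via prefix slices); alternative, not faster.


-- ===== PORT A =====
-- the for-loop: state = (unlearned_words, seen_words); 'break' returns the accumulator
def pvLoopA (learned_set : PySem.Set String) : List String → List String → PySem.Set String → List String
  | [], unlearned, _ => unlearned
  | w :: ws, unlearned, seen =>
    if w == "#" then unlearned
    else if !(PySem.Set.contains learned_set w) && !(PySem.Set.contains seen w) then
      pvLoopA learned_set ws (unlearned ++ [w]) (PySem.Set.add seen w)
    else
      pvLoopA learned_set ws unlearned seen

def find_unlearned_words (learned_words : List String) (article : String) : List String :=
  let learned_set := PySem.Set.ofList learned_words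
  let article_words := PySem.Str.split₀ article
  pvLoopA learned_set article_words [] PySem.Set.empty

-- ===== PORT B =====
-- one comprehension over enumerate(words); words[:i+1] and words[:i] are prefix slices
def find_unlearned_words_alt (learned_words : List String) (article : String) : List String :=
  let words := PySem.Str.split₀ article
  (PySem.List.enumerate words 0).filterMap (fun p =>
    if !((PySem.List.slice words none (some (p.1 + 1))).contains "#")
       && !(learned_words.contains p.2)
       && !((PySem.List.slice words none (some p.1)).contains p.2)
    then some p.2 else none)

-- ===== PRECONDITION & SPEC =====
def Spec_find_unlearned_words (learned_words : List String) (article : String) (out : List String) : Prop := out = find_unlearned_words_alt learned_words article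
instance (learned_words : List String) (article : String) (out : List String) : Decidable (Spec_find_unlearned_words learned_words article out) := by unfold Spec_find_unlearned_words; infer_instance

-- ===== CLAIM (what is proved, stated in full; the proofs are below) =====
def Claim_equal_find_unlearned_words : Prop := ∀ (learned_words : List String) (article : String), Dom_find_unlearned_words learned_words article → Spec_find_unlearned_words learned_words article (find_unlearned_words learned_words article)

-- ===== LEMMAS AND PROOFS =====

-- first-occurrence dedup with an explicit seen list (normal form relating the two ports)
def pvDed : List String → List String → List String
  | [], _ => []
  | w :: ws, seen => if w ∈ seen then pvDed ws seen else w :: pvDed ws (w :: seen)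

lemma pvDed_congr (ws : List String) : ∀ s t : List String,
    (∀ w, w ∈ s ↔ w ∈ t) → pvDed ws s = pvDed ws t := by
  induction ws with
  | nil => intros; rfl
  | cons w ws ih =>
    intro s t h
    by_cases hc : w ∈ t
    · simp [pvDed, hc, (h w).mpr hc, ih s t h]
    · have hs : w ∉ s := fun hx => hc ((h w).mp hx)
      have hrec := ih (w :: s) (w :: t) (by intro w'; simp [h w'])
      simp [pvDed, hs, hc, hrec]

-- A's single pass equals filter-of-dedup on the takeWhile prefix,
-- for any pair of seen sets agreeing on unlearned words
lemma pvLoopA_eq (ls : PySem.Set String) (ws : List String) :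
    ∀ (acc : List String) (sa : PySem.Set String) (sb : List String),
    (∀ w, w ∉ (ls : List String) → (w ∈ (sa : List String) ↔ w ∈ sb)) →
    pvLoopA ls ws acc sa =
      acc ++ (pvDed (ws.takeWhile (fun w => !(w == "#"))) sb).filter
        (fun w => !(PySem.Set.contains ls w)) := by
  induction ws with
  | nil => intro acc sa sb _; simp [pvLoopA, pvDed]
  | cons w ws ih =>
    intro acc sa sb h
    by_cases hw : w = "#"
    · subst hw; simp [pvLoopA, pvDed]
    · have htw : List.takeWhile (fun w => !(w == "#")) (w :: ws)
          = w :: List.takeWhile (fun w => !(w == "#")) ws := by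
        simp [hw]
      rw [htw]
      by_cases hl : w ∈ (ls : List String)
      · by_cases hsb : w ∈ sb
        · simp only [pvDed, if_pos hsb]
          simpa [pvLoopA, hw, hl] using ih acc sa sb h
        · have h' : ∀ w', w' ∉ (ls : List String) → (w' ∈ (sa : List String) ↔ w' ∈ w :: sb) := by
            intro w' hls
            have hne : w' ≠ w := fun he => hls (he ▸ hl)
            simp [hne, h w' hls]
          simp only [pvDed, if_neg hsb, List.filter_cons]
          simpa [pvLoopA, hw, hl] using ih acc sa (w :: sb) h'
      · by_cases hsa : w ∈ (sa : List String)
        · have hsb : w ∈ sb := (h w hl).mp hsa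
          simp only [pvDed, if_pos hsb]
          simpa [pvLoopA, hw, hl, hsa] using ih acc sa sb h
        · have hsb : w ∉ sb := fun hx => hsa ((h w hl).mpr hx)
          have h' : ∀ w', w' ∉ (ls : List String) →
              (w' ∈ (PySem.Set.add sa w : List String) ↔ w' ∈ w :: sb) := by
            intro w' hls
            simp [PySem.Set.add, hsa, h w' hls, or_comm]
          have hrec := ih (acc ++ [w]) (PySem.Set.add sa w) (w :: sb) h'
          simp only [pvDed, if_neg hsb, List.filter_cons]
          simpa [pvLoopA, hw, hl, hsa, List.append_assoc] using hrec

-- B's comprehension, started at offset k, equals filter-of-dedup with seen = the consumed prefix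
lemma pvKey (learned full : List String) : ∀ (xs : List String) (k : Nat), xs = full.drop k →
    ((PySem.List.enumerate xs (k : Int)).filterMap (fun p =>
       if !((PySem.List.slice full none (some (p.1 + 1))).contains "#")
          && !(learned.contains p.2)
          && !((PySem.List.slice full none (some p.1)).contains p.2)
       then some p.2 else none))
    = if (full.take k).contains "#" then []
      else (pvDed (xs.takeWhile (fun w => !(w == "#"))) (full.take k)).filter
             (fun w => !(learned.contains w)) := by
  intro xs
  induction xs with
  | nil => intro k _; simp [pvDed]
  | cons w ws ih =>
    intro k h
    have hget : full[k]? = some w := by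
      rw [← List.head?_drop, ← h]; rfl
    have htake : full.take (k + 1) = full.take k ++ [w] := by
      rw [List.take_add_one, hget]; rfl
    have hws : ws = full.drop (k + 1) := by
      have := congrArg List.tail h
      simpa [List.tail_drop] using this
    have hcast : (k : Int) + 1 = ((k + 1 : Nat) : Int) := by push_cast; ring
    rw [PySem.List.enumerate_cons, List.filterMap_cons]
    simp only [hcast, PySem.List.slice_to_natCast]
    rw [ih (k + 1) hws]
    by_cases hH : ("#" : String) ∈ full.take k
    · have h1 : ("#" : String) ∈ full.take (k + 1) := by rw [htake]; simp [hH]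
      simp [hH, h1]
    · by_cases hw : w = "#"
      · have h1 : ("#" : String) ∈ full.take (k + 1) := by rw [htake, hw]; simp
        simp [hH, h1, hw, pvDed]
      · have h1 : ("#" : String) ∉ full.take (k + 1) := by
          rw [htake]; simp [hH, Ne.symm hw]
        have htw : List.takeWhile (fun w => !(w == "#")) (w :: ws)
            = w :: List.takeWhile (fun w => !(w == "#")) ws := by simp [hw]
        have hcongr : pvDed (List.takeWhile (fun w => !(w == "#")) ws) (full.take (k + 1))
            = pvDed (List.takeWhile (fun w => !(w == "#")) ws) (w :: full.take k) := by
          apply pvDed_congr; intro w'; rw [htake]; simp [or_comm]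
        by_cases hfk : w ∈ full.take k
        · have hcongr2 : pvDed (List.takeWhile (fun w => !(w == "#")) ws) (w :: full.take k)
              = pvDed (List.takeWhile (fun w => !(w == "#")) ws) (full.take k) := by
            apply pvDed_congr; intro w'
            simp only [List.mem_cons]
            constructor
            · rintro (rfl | h2)
              · exact hfk
              · exact h2
            · exact Or.inr
          simp [hH, h1, hfk, htw, pvDed, hcongr, hcongr2]
        · by_cases hlw : w ∈ learned
          · simp [hH, h1, hfk, hlw, htw, pvDed, hcongr]
          · simp [hH, h1, hfk, hlw, htw, pvDed, hcongr]

-- ===== VERDICT (by name: the statement is the Claim_ definition above) =====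
theorem find_unlearned_words_spec : Claim_equal_find_unlearned_words := by
  intro learned_words article _
  show pvLoopA (PySem.Set.ofList learned_words) (PySem.Str.split₀ article) [] PySem.Set.empty
      = (PySem.List.enumerate (PySem.Str.split₀ article) 0).filterMap (fun p =>
          if !((PySem.List.slice (PySem.Str.split₀ article) none (some (p.1 + 1))).contains "#")
             && !(learned_words.contains p.2)
             && !((PySem.List.slice (PySem.Str.split₀ article) none (some p.1)).contains p.2)
          then some p.2 else none)
  have hB := pvKey learned_words (PySem.Str.split₀ article) (PySem.Str.split₀ article) 0 rfl
  rw [show ((0 : Nat) : Int) = 0 from rfl] at hB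
  rw [hB]
  simp only [List.take_zero, List.contains_nil, Bool.false_eq_true, if_false]
  rw [pvLoopA_eq _ _ [] PySem.Set.empty [] (fun _ _ => Iff.rfl)]
  simp only [List.nil_append]
  apply List.filter_congr
  intro w _
  simp [PySem.Set.contains, PySem.Set.mem_ofList]
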